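-- pv_equiv track=rewrite | github.com/Manaswinigithub/hiding-text-using-steganography | text-steganography code(encoding , decoding).py | encode_capitalization
-- ===== SOURCE A (Python) =====
-- def message_to_binary(message):
--     # Convert each character to its binary representation
--     return ''.join(format(ord(char), '08b') for char in message)
--
-- def encode_capitalization(text, message):
--     binary_message = message_to_binary(message)
--     encoded_text = ''
--     binary_index = 0
--
--     for char in text:
--         if char.isalpha():
--             if binary_index < len(binary_message):
--                 if binary_message[binary_index] == '1':
--                     encoded_text += char.upper()
--                 else:
--                     encoded_text += char.lower()
--                 binary_index += 1
--             else:
--                 encoded_text += char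
--         else:
--             encoded_text += char
--
--     return encoded_text
-- ===== SOURCE B (Python) =====
-- def message_to_binary(message):
--     return ''.join(format(ord(char), '08b') for char in message)
--
-- def encode_capitalization(text, message):
--     bits = message_to_binary(message)
--     chars = list(text)
--     alpha_positions = [i for i, c in enumerate(text) if c.isalpha()]
--     for pos, bit in zip(alpha_positions, bits):
--         chars[pos] = chars[pos].upper() if bit == '1' else chars[pos].lower()
--     return ''.join(chars)
-- ===== Notes on version B (the rewrite author's own statement) =====
-- stated objective: alternative
-- what changed: Replaces the single interleaved pass that counts bits while rebuilding the string with two phases: one pass collects the indices of alphabetic characters, then a scatter over zip(alpha_positions, bits) rewrites exactly those positions in a mutable character list.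
import Mathlib
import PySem

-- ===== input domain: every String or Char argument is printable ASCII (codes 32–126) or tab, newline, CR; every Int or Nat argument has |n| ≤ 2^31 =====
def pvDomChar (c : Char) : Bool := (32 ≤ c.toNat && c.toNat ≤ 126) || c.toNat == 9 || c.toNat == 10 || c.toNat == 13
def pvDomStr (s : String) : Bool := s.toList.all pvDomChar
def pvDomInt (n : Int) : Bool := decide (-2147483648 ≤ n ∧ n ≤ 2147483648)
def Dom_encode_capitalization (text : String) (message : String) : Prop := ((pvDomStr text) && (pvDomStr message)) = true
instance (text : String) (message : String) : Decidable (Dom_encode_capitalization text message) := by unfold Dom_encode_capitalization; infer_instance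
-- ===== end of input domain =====

-- B differs from A by decomposition: A interleaves bit counting with string rebuilding in one
-- pass; B first collects the alpha positions, then scatters case changes into a char list.

-- shared module helper message_to_binary: ''.join(format(ord(c),'08b') for c in message)
def pvMsgBin (message : List Char) : List Char :=
  (message.map (fun c => PySem.Chars.zfill (PySem.Int.toBinChars (c.toNat : Int)) 8)).flatten

-- ===== PORT A =====
-- literal port of A's loop: accumulator string (as List Char) plus a bit index
def encode_capitalization (text : String) (message : String) : String :=
  let bm := pvMsgBin message.toList
  let r := text.toList.foldl (fun (st : List Char × Nat) c =>
    if PySem.Chars.isalpha c then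
      if st.2 < bm.length then
        (if bm.getD st.2 ' ' == '1' then
          (st.1 ++ [PySem.Chars.upperChar c], st.2 + 1)
        else
          (st.1 ++ [PySem.Chars.lowerChar c], st.2 + 1))
      else (st.1 ++ [c], st.2)
    else (st.1 ++ [c], st.2)) ([], 0)
  String.ofList r.1

-- ===== PORT B =====
-- port of Source B: alpha position list, then a scatter over zip(positions, bits)
def encode_capitalization_alt (text : String) (message : String) : String :=
  let bits := pvMsgBin message.toList
  let chars := text.toList
  let alphaPositions := (text.toList.zipIdx).filterMap
    (fun p => if PySem.Chars.isalpha p.1 then some p.2 else none)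
  let r := (alphaPositions.zip bits).foldl (fun cs pb =>
    cs.set pb.1 (if pb.2 == '1' then PySem.Chars.upperChar (cs.getD pb.1 ' ')
                 else PySem.Chars.lowerChar (cs.getD pb.1 ' '))) chars
  String.ofList r

-- ===== PRECONDITION & SPEC =====
def Spec_encode_capitalization (text : String) (message : String) (out : String) : Prop := out = encode_capitalization_alt text message
instance (text : String) (message : String) (out : String) : Decidable (Spec_encode_capitalization text message out) := by unfold Spec_encode_capitalization; infer_instance

-- ===== CLAIM (what is proved, stated in full; the proofs are below) =====
def Claim_equal_encode_capitalization : Prop := ∀ (text : String) (message : String), Dom_encode_capitalization text message → Spec_encode_capitalization text message (encode_capitalization text message)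

-- ===== LEMMAS AND PROOFS =====

-- common reference recursion: consume one bit per alphabetic char while bits remain
def pvTr (b c : Char) : Char :=
  if b == '1' then PySem.Chars.upperChar c else PySem.Chars.lowerChar c

def pvGo : List Char → List Char → List Char
  | [], _ => []
  | c :: cs, bm =>
    if PySem.Chars.isalpha c then
      match bm with
      | [] => c :: pvGo cs []
      | b :: bs => pvTr b c :: pvGo cs bs
    else c :: pvGo cs bm

theorem pvGo_nilBits (cs : List Char) : pvGo cs [] = cs := by
  induction cs with
  | nil => rfl
  | cons c cs ih =>
    by_cases h : PySem.Chars.isalpha c <;> simp [pvGo, h, ih]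

-- A's foldl, generalized over accumulator and bit index, equals pvGo on the remaining bits
theorem pvA_loop (bm : List Char) (cs : List Char) :
    ∀ (acc : List Char) (i : Nat),
    (cs.foldl (fun (st : List Char × Nat) c =>
      if PySem.Chars.isalpha c then
        if st.2 < bm.length then
          (if bm.getD st.2 ' ' == '1' then
            (st.1 ++ [PySem.Chars.upperChar c], st.2 + 1)
          else
            (st.1 ++ [PySem.Chars.lowerChar c], st.2 + 1))
        else (st.1 ++ [c], st.2)
      else (st.1 ++ [c], st.2)) (acc, i)).1 = acc ++ pvGo cs (bm.drop i) := by
  induction cs with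
  | nil => intro acc i; simp [pvGo]
  | cons c cs ih =>
    intro acc i
    by_cases ha : PySem.Chars.isalpha c
    · by_cases hi : i < bm.length
      · have hdrop : bm.drop i = bm[i] :: bm.drop (i + 1) := List.drop_eq_getElem_cons hi
        have hget : bm.getD i ' ' = bm[i] := List.getD_eq_getElem bm ' ' hi
        by_cases hb : bm[i] = '1'
        · simp only [List.foldl_cons, ha, hi, hget, hb, if_true, beq_self_eq_true]
          rw [ih, hdrop]
          simp [pvGo, ha, pvTr, hb]
        · have hb' : (bm.getD i ' ' == '1') = false := by rw [hget]; simp [hb]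
          simp only [List.foldl_cons, ha, hi, hb', if_true, Bool.false_eq_true,
            ite_false]
          rw [ih, hdrop]
          simp [pvGo, ha, pvTr, hb]
      · have hdrop : bm.drop i = [] := List.drop_eq_nil_of_le (by omega)
        simp only [List.foldl_cons, ha, hi, if_true, ite_false]
        rw [ih, hdrop]
        simp [pvGo, ha, pvGo_nilBits]
    · simp only [List.foldl_cons, ha, Bool.false_eq_true, ite_false]
      rw [ih]
      simp [pvGo, ha]

-- positions of alphabetic chars, offset k (B's list comprehension over enumerate)
def pvPos (cs : List Char) (k : Nat) : List Nat :=
  (cs.zipIdx k).filterMap (fun p => if PySem.Chars.isalpha p.1 then some p.2 else none)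

theorem pvPos_cons (c : Char) (cs : List Char) (k : Nat) :
    pvPos (c :: cs) k =
      if PySem.Chars.isalpha c then k :: pvPos cs (k + 1) else pvPos cs (k + 1) := by
  by_cases h : PySem.Chars.isalpha c <;> simp [pvPos, List.zipIdx_cons, h]

-- B's scatter over zip(positions, bits) equals pvGo, for any already-settled prefix
theorem pvB_loop (cs : List Char) :
    ∀ (pre : List Char) (bm : List Char),
    ((pvPos cs pre.length).zip bm).foldl (fun l pb =>
      l.set pb.1 (if pb.2 == '1' then PySem.Chars.upperChar (l.getD pb.1 ' ')
                  else PySem.Chars.lowerChar (l.getD pb.1 ' '))) (pre ++ cs)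
    = pre ++ pvGo cs bm := by
  induction cs with
  | nil => intro pre bm; simp [pvPos, pvGo]
  | cons c cs ih =>
    intro pre bm
    rw [pvPos_cons]
    by_cases ha : PySem.Chars.isalpha c
    · cases bm with
      | nil => simp [ha, pvGo, pvGo_nilBits]
      | cons b bs =>
        have hgd : (pre ++ c :: cs).getD pre.length ' ' = c := by
          simp [List.getD_eq_getElem?_getD]
        have hset : ∀ d : Char, (pre ++ c :: cs).set pre.length d = (pre ++ [d]) ++ cs := by
          intro d
          rw [List.set_append_right _ _ (Nat.le_refl _)]
          simp
        have := ih (pre ++ [pvTr b c]) bs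
        simp only [List.length_append, List.length_cons, List.length_nil] at this
        simp only [ha, if_pos, List.zip_cons_cons, List.foldl_cons, hgd, hset]
        by_cases hb : b = '1'
        · simpa [pvGo, ha, pvTr, hb, List.append_assoc] using this
        · simpa [pvGo, ha, pvTr, hb, List.append_assoc] using this
    · have := ih (pre ++ [c]) bm
      simp only [List.length_append, List.length_cons, List.length_nil] at this
      simp only [ha, Bool.false_eq_true, ite_false]
      simpa [pvGo, ha, List.append_assoc] using this

-- ===== VERDICT (by name: the statement is the Claim_ definition above) =====
theorem encode_capitalization_spec : Claim_equal_encode_capitalization := by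
  intro text message _
  unfold Spec_encode_capitalization encode_capitalization encode_capitalization_alt
  have hA := pvA_loop (pvMsgBin message.toList) text.toList [] 0
  have hB := pvB_loop text.toList [] (pvMsgBin message.toList)
  simp only [List.drop_zero, List.nil_append, List.length_nil] at hA hB
  simp only []
  rw [hA]
  have : ((text.toList.zipIdx).filterMap
      (fun p => if PySem.Chars.isalpha p.1 then some p.2 else none)) = pvPos text.toList 0 := rfl
  rw [this, hB]
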